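-- pv_equiv track=rewrite | github.com/beliosien/2024A-TP01 | ex5.py | check_chaine
-- ===== SOURCE A (Python) =====
-- def check_chaine(chaine):
--     valid_char = {
--         "G": 0,
--         "B": 0,
--         "S": 0
--     }
--     for c in chaine:
--         if c not in valid_char.keys():
--             return None
--         else:
--             valid_char[c] += 1
--     return valid_char
-- ===== SOURCE B (Python) =====
-- def check_chaine(chaine):
--     if any(c not in "GBS" for c in chaine):
--         return None
--     return {"G": chaine.count("G"), "B": chaine.count("B"), "S": chaine.count("S")}
-- ===== Notes on version B (the rewrite author's own statement) =====
-- stated objective: simpler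
-- what changed: Replaces the fused validate-and-tally loop over a mutable dict by a validation pass (any) followed by three str.count scans building the dict literally.
import Mathlib
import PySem

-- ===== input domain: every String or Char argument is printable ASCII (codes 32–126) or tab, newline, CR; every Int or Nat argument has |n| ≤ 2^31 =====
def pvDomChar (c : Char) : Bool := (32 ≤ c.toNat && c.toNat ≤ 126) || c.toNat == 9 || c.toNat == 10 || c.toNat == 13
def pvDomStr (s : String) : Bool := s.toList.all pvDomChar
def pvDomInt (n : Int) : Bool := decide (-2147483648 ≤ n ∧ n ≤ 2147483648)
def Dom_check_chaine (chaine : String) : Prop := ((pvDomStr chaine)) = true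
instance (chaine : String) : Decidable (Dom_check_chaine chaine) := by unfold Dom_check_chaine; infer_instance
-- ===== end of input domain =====

-- B replaces A's fused validate-and-tally loop over a mutable dict by a validation
-- pass plus three counting scans (objective: simpler); return values agree everywhere.

-- ===== PORT A =====
-- the for-loop of A: early `return None` on an invalid char, else increment the dict entry
def check_chaine_loop : List Char → PySem.Dict String Int → Option (PySem.Dict String Int)
  | [], d => some d
  | c :: rest, d =>
    if !(d.contains (String.ofList [c])) then none
    else check_chaine_loop rest (d.insert (String.ofList [c]) (d.getD (String.ofList [c]) 0 + 1))

def check_chaine (chaine : String) : Option (List (String × Int)) :=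
  (check_chaine_loop chaine.toList
    (PySem.Dict.ofList [("G", 0), ("B", 0), ("S", 0)])).map (fun d => d.items)

-- ===== PORT B =====
-- Source B: validate with any(), then build the dict from three counts; the single-char
-- str.count is ported as List.count over the characters (exact for a 1-char needle)
def check_chaine_alt (chaine : String) : Option (List (String × Int)) :=
  if chaine.toList.any (fun c => !(c == 'G' || c == 'B' || c == 'S')) then none
  else some [("G", (chaine.toList.count 'G' : Int)),
             ("B", (chaine.toList.count 'B' : Int)),
             ("S", (chaine.toList.count 'S' : Int))]

-- ===== PRECONDITION & SPEC =====
def Spec_check_chaine (chaine : String) (out : Option (List (String × Int))) : Prop := out = check_chaine_alt chaine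
instance (chaine : String) (out : Option (List (String × Int))) : Decidable (Spec_check_chaine chaine out) := by unfold Spec_check_chaine; infer_instance

-- ===== CLAIM (what is proved, stated in full; the proofs are below) =====
def Claim_equal_check_chaine : Prop := ∀ (chaine : String), Dom_check_chaine chaine → Spec_check_chaine chaine (check_chaine chaine)

-- ===== LEMMAS AND PROOFS =====

-- the loop invariant: starting from counts (g, b, s), A's loop fails iff some char is
-- invalid, and otherwise adds the three character counts
theorem check_chaine_loop_eq (cs : List Char) (g b s : Int) :
    check_chaine_loop cs (PySem.Dict.mk [("G", g), ("B", b), ("S", s)]) =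
      if cs.any (fun c => !(c == 'G' || c == 'B' || c == 'S')) then none
      else some (PySem.Dict.mk [("G", g + cs.count 'G'), ("B", b + cs.count 'B'), ("S", s + cs.count 'S')]) := by
  induction cs generalizing g b s with
  | nil => simp [check_chaine_loop]
  | cons c rest ih =>
    by_cases hg : c = 'G'
    · subst hg
      have step : check_chaine_loop ('G' :: rest) (PySem.Dict.mk [("G", g), ("B", b), ("S", s)]) =
          check_chaine_loop rest (PySem.Dict.mk [("G", g + 1), ("B", b), ("S", s)]) := by
        show (if _ then _ else _) = _
        norm_num [PySem.Dict.contains, PySem.Dict.insert, PySem.Dict.getD, PySem.Dict.get?,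
          show String.ofList ['G'] = "G" from rfl,
          show ("B" : String) ≠ "G" by decide, show ("S" : String) ≠ "G" by decide]
      rw [step, ih]
      simp
      split_ifs; simp; ring_nf
    · by_cases hb : c = 'B'
      · subst hb
        have step : check_chaine_loop ('B' :: rest) (PySem.Dict.mk [("G", g), ("B", b), ("S", s)]) =
            check_chaine_loop rest (PySem.Dict.mk [("G", g), ("B", b + 1), ("S", s)]) := by
          show (if _ then _ else _) = _
          norm_num [PySem.Dict.contains, PySem.Dict.insert, PySem.Dict.getD, PySem.Dict.get?,
            show String.ofList ['B'] = "B" from rfl,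
            show ("G" : String) ≠ "B" by decide, show ("S" : String) ≠ "B" by decide]
        rw [step, ih]
        simp
        split_ifs; simp; ring_nf
      · by_cases hs : c = 'S'
        · subst hs
          have step : check_chaine_loop ('S' :: rest) (PySem.Dict.mk [("G", g), ("B", b), ("S", s)]) =
              check_chaine_loop rest (PySem.Dict.mk [("G", g), ("B", b), ("S", s + 1)]) := by
            show (if _ then _ else _) = _
            norm_num [PySem.Dict.contains, PySem.Dict.insert, PySem.Dict.getD, PySem.Dict.get?,
              show String.ofList ['S'] = "S" from rfl,
              show ("G" : String) ≠ "S" by decide, show ("B" : String) ≠ "S" by decide]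
          rw [step, ih]
          simp
          split_ifs; simp; ring_nf
        · -- invalid character: the loop returns none
          have hkey : ∀ (t : String) (x : Char), t.toList = [x] → c ≠ x → (t == String.ofList [c]) = false := by
            intro t x htx hcx
            simp only [beq_eq_false_iff_ne, ne_eq]
            intro h
            have h2 := congrArg String.toList h
            rw [htx, String.toList_ofList] at h2
            exact hcx (List.cons.injEq .. ▸ h2).1.symm
          show (if _ then _ else _) = _
          have hcont : (PySem.Dict.mk [("G", (g:Int)), ("B", b), ("S", s)]).contains (String.ofList [c]) = false := by
            simp [PySem.Dict.contains, hkey "G" 'G' rfl hg, hkey "B" 'B' rfl hb, hkey "S" 'S' rfl hs]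
          rw [hcont]
          simp [List.any_cons, hg, hb, hs]

-- ===== VERDICT (by name: the statement is the Claim_ definition above) =====
theorem check_chaine_spec : Claim_equal_check_chaine := by
  intro chaine _
  show check_chaine chaine = check_chaine_alt chaine
  unfold check_chaine check_chaine_alt
  have : PySem.Dict.ofList [("G", (0:Int)), ("B", 0), ("S", 0)] = PySem.Dict.mk [("G", 0), ("B", 0), ("S", 0)] := by decide
  rw [this, check_chaine_loop_eq]
  split_ifs <;> simp
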